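-- pv_equiv track=rewrite | github.com/stangelandcl/hardhat | hardhat/recipes/python/__init__.py | needs_python
-- ===== SOURCE A (Python) =====
-- def needs_python(depends, version):
--     needs = False
--     has = False
--     for d in depends:
--         if d.startswith('python%s-' % version):
--             needs = True
--         elif d == 'python%s' % version:
--             has = True
--     return needs and not has
-- ===== SOURCE B (Python) =====
-- def needs_python(depends, version):
--     return any(d.startswith('python%s-' % version) for d in depends) and \
--         not any(d == 'python%s' % version for d in depends)
-- ===== Notes on version B (the rewrite author's own statement) =====
-- stated objective: idiomatic
-- what changed: Replaces the flag-maintaining elif loop with two independent any() scans (prefix match and exact match), combined as needs and not has; this is valid because an exact match can never also carry the longer dash-suffixed prefix.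
import Mathlib
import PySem

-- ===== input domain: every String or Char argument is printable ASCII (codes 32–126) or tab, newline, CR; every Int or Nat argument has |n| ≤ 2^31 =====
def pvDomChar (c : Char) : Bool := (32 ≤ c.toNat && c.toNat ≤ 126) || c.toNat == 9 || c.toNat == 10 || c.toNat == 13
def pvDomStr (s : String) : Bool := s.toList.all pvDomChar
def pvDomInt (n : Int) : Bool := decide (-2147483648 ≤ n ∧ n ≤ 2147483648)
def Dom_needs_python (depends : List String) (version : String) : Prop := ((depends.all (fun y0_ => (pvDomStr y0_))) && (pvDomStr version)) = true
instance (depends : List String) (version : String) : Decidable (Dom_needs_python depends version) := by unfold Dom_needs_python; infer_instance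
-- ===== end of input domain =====

-- B replaces A's single flag-maintaining elif loop by two independent any() scans; idiomatic, same cost.

-- ===== PORT A =====
-- literal port of A: one pass keeping the (needs, has) flags, elif order preserved
def needs_python (depends : List String) (version : String) : Bool :=
  let st := depends.foldl
    (fun (st : Bool × Bool) d =>
      if PySem.Str.startswith d ("python" ++ version ++ "-") then (true, st.2)
      else if d == "python" ++ version then (st.1, true)
      else st)
    (false, false)
  st.1 && !st.2

-- ===== PORT B =====
-- literal port of B: two independent any() scans
def needs_python_alt (depends : List String) (version : String) : Bool :=
  (depends.any (fun d => PySem.Str.startswith d ("python" ++ version ++ "-"))) &&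
  !(depends.any (fun d => d == "python" ++ version))

-- ===== PRECONDITION & SPEC =====
def Spec_needs_python (depends : List String) (version : String) (out : Bool) : Prop := out = needs_python_alt depends version
instance (depends : List String) (version : String) (out : Bool) : Decidable (Spec_needs_python depends version out) := by unfold Spec_needs_python; infer_instance

-- ===== CLAIM (what is proved, stated in full; the proofs are below) =====
def Claim_equal_needs_python : Prop := ∀ (depends : List String) (version : String), Dom_needs_python depends version → Spec_needs_python depends version (needs_python depends version)

-- ===== LEMMAS AND PROOFS =====

-- an exact "python<v>" match can never start with the longer "python<v>-"
theorem eq_target_not_pre (d version : String)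
    (h : (d == "python" ++ version) = true) :
    PySem.Str.startswith d ("python" ++ version ++ "-") = false := by
  have hd : d = "python" ++ version := by exact eq_of_beq h
  subst hd
  by_contra hcon
  have htrue : PySem.Str.startswith ("python" ++ version) ("python" ++ version ++ "-") = true := by
    cases hb : PySem.Str.startswith ("python" ++ version) ("python" ++ version ++ "-") with
    | false => exact absurd hb hcon
    | true => rfl
  rw [PySem.Str.startswith_eq] at htrue
  have hpre := (PySem.Chars.startswith_iff _ _).mp htrue
  have hlen := hpre.length_le
  simp [String.toList_append] at hlen

theorem loop_flags (version : String) (l : List String) (n h : Bool) :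
    l.foldl
      (fun (st : Bool × Bool) d =>
        if PySem.Str.startswith d ("python" ++ version ++ "-") then (true, st.2)
        else if d == "python" ++ version then (st.1, true)
        else st)
      (n, h)
    = (n || l.any (fun d => PySem.Str.startswith d ("python" ++ version ++ "-")),
       h || l.any (fun d => d == "python" ++ version)) := by
  induction l generalizing n h with
  | nil => simp
  | cons x xs ih =>
    simp only [List.foldl_cons, List.any_cons]
    by_cases hp : PySem.Str.startswith x ("python" ++ version ++ "-") = true
    · rw [if_pos hp, ih, hp]
      have he : (x == "python" ++ version) = false := by
        cases he' : (x == "python" ++ version)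
        · rfl
        · exact absurd (eq_target_not_pre x version he') (by simpa using hp)
      rw [he]
      simp only [Bool.true_or, Bool.or_true, Bool.false_or]
    · rw [if_neg hp]
      simp only [Bool.not_eq_true] at hp
      by_cases he : (x == "python" ++ version) = true
      · rw [if_pos he, ih, he, hp]
        simp only [Bool.false_or, Bool.or_true, Bool.true_or]
      · rw [if_neg he, ih]
        simp only [Bool.not_eq_true] at he
        rw [hp, he]
        simp only [Bool.false_or]

-- ===== VERDICT (by name: the statement is the Claim_ definition above) =====
theorem needs_python_spec : Claim_equal_needs_python := by
  intro depends version _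
  unfold Spec_needs_python needs_python needs_python_alt
  simp only [loop_flags, Bool.false_or]
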